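-- pv_equiv track=rewrite | github.com/pesho-ivanov/celldive | src/algo/clonality_stats.py | get_tcr_stats_cells
-- ===== SOURCE A (Python) =====
-- from collections import OrderedDict
--
-- def get_tcr_stats_cells(parts):
--     cells_with_alphas, cells_with_betas = set(), set()
--     cells_with_2alphas, cells_with_2betas = set(), set()
--
--     for part, cells in parts.items():
--         if part != 'clonotype':
--             for cell_name, cell in cells.items():
--                 alphas = cell['alphas'] if 'alphas' in cell else []
--                 betas = cell['betas'] if 'betas' in cell else []
--                 seqs = alphas + betas
--                 if len(alphas) >= 1:
--                     cells_with_alphas.add(cell_name)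
--                 if len(betas) >= 1:
--                     cells_with_betas.add(cell_name)
--                 if len(alphas) >= 2:
--                     cells_with_2alphas.add(cell_name)
--                 if len(betas) >= 2:
--                     cells_with_2betas.add(cell_name)
--
--     res = OrderedDict()
--     res['#cells with >=1 alphas'] = len(cells_with_alphas)
--     res['#cells with >=1 betas'] = len(cells_with_betas)
--     res['#cells with >=1 alphas and >=1 betas'] = len(cells_with_alphas & cells_with_betas)
--     res['#cells with >=2 alphas'] = len(cells_with_2alphas)
--     res['#cells with >=2 betas'] = len(cells_with_2betas)
--     res['#cells with >=2 alphas and >=2 betas'] = len(cells_with_2alphas & cells_with_2betas)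
--     return res
-- ===== SOURCE B (Python) =====
-- from collections import OrderedDict
--
-- def get_tcr_stats_cells(parts):
--     # Stage 1: flatten to (cell_name, n_alphas, n_betas) occurrences.
--     occ = [(name, len(cell.get('alphas', [])), len(cell.get('betas', [])))
--            for part, cells in parts.items() if part != 'clonotype'
--            for name, cell in cells.items()]
--     # Stage 2: aggregate per-cell maxima of the chain counts.
--     agg = {}
--     for name, na, nb in occ:
--         ma, mb = agg.get(name, (0, 0))
--         agg[name] = (max(ma, na), max(mb, nb))
--     # Stage 3: read the six counts off thresholds on the maxima.
--     vs = list(agg.values())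
--     return OrderedDict([
--         ('#cells with >=1 alphas', sum(1 for a, b in vs if a >= 1)),
--         ('#cells with >=1 betas', sum(1 for a, b in vs if b >= 1)),
--         ('#cells with >=1 alphas and >=1 betas', sum(1 for a, b in vs if a >= 1 and b >= 1)),
--         ('#cells with >=2 alphas', sum(1 for a, b in vs if a >= 2)),
--         ('#cells with >=2 betas', sum(1 for a, b in vs if b >= 2)),
--         ('#cells with >=2 alphas and >=2 betas', sum(1 for a, b in vs if a >= 2 and b >= 2)),
--     ])
-- ===== Notes on version B (the rewrite author's own statement) =====
-- stated objective: alternative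
-- what changed: Instead of recording four threshold memberships in sets during the scan and intersecting them, B stages the work: flatten all parts into (cell, #alphas, #betas) occurrence triples, aggregate per-cell numeric maxima of the chain counts in one dict, and only at the end derive all six counts (intersections included) by thresholding the maxima.
import Mathlib
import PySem

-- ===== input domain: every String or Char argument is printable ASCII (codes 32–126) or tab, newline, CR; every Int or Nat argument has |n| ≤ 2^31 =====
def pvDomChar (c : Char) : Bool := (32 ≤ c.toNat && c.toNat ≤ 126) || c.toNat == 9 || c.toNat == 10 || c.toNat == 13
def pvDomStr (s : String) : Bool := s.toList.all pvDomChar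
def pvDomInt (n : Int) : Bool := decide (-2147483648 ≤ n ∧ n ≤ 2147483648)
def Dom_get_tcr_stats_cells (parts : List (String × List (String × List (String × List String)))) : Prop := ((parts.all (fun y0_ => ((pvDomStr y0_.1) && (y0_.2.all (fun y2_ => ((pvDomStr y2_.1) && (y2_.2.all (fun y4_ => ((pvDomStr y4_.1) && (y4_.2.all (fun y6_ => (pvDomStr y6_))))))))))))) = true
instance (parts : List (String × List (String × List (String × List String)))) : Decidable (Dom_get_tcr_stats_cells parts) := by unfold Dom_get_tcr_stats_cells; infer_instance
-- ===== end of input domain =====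

-- B replaces A's four threshold sets by a staged pipeline (flatten occurrences → per-cell maxima of chain counts → threshold the maxima); objective: alternative decomposition, not faster.

-- ===== PORT A =====
-- A-side helpers: the body of the inner and outer loops of A.
def pvCellA (st : PySem.Set String × PySem.Set String × PySem.Set String × PySem.Set String)
    (c : String × List (String × List String)) :
    PySem.Set String × PySem.Set String × PySem.Set String × PySem.Set String :=
  let d := PySem.Dict.mk c.2
  let alphas := if d.contains "alphas" then (d.get? "alphas").getD [] else []
  let betas := if d.contains "betas" then (d.get? "betas").getD [] else []
  ((if 1 ≤ alphas.length then PySem.Set.add st.1 c.1 else st.1),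
   (if 1 ≤ betas.length then PySem.Set.add st.2.1 c.1 else st.2.1),
   (if 2 ≤ alphas.length then PySem.Set.add st.2.2.1 c.1 else st.2.2.1),
   (if 2 ≤ betas.length then PySem.Set.add st.2.2.2 c.1 else st.2.2.2))

def pvPartA (st : PySem.Set String × PySem.Set String × PySem.Set String × PySem.Set String)
    (pc : String × List (String × List (String × List String))) :
    PySem.Set String × PySem.Set String × PySem.Set String × PySem.Set String :=
  if pc.1 ≠ "clonotype" then pc.2.foldl pvCellA st else st

def get_tcr_stats_cells (parts : List (String × List (String × List (String × List String)))) : List (String × Int) :=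
  let st := parts.foldl pvPartA (PySem.Set.empty, PySem.Set.empty, PySem.Set.empty, PySem.Set.empty)
  [("#cells with >=1 alphas", PySem.Set.len st.1),
   ("#cells with >=1 betas", PySem.Set.len st.2.1),
   ("#cells with >=1 alphas and >=1 betas", PySem.Set.len (PySem.Set.inter st.1 st.2.1)),
   ("#cells with >=2 alphas", PySem.Set.len st.2.2.1),
   ("#cells with >=2 betas", PySem.Set.len st.2.2.2),
   ("#cells with >=2 alphas and >=2 betas", PySem.Set.len (PySem.Set.inter st.2.2.1 st.2.2.2))]

-- ===== PORT B =====
-- B-side helpers: stage 1 (flatten to occurrence triples) and stage 2 (max-merge of one occurrence).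
def pvOcc (parts : List (String × List (String × List (String × List String)))) :
    List (String × Int × Int) :=
  parts.flatMap (fun pc =>
    if pc.1 ≠ "clonotype" then
      pc.2.map (fun c =>
        let d := PySem.Dict.mk c.2
        (c.1, ((d.getD "alphas" []).length : Int), ((d.getD "betas" []).length : Int)))
    else [])

def pvMerge (agg : PySem.Dict String (Int × Int)) (o : String × Int × Int) :
    PySem.Dict String (Int × Int) :=
  let m := agg.getD o.1 (0, 0)
  agg.insert o.1 (max m.1 o.2.1, max m.2 o.2.2)

def get_tcr_stats_cells_alt (parts : List (String × List (String × List (String × List String)))) : List (String × Int) :=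
  let agg := (pvOcc parts).foldl pvMerge PySem.Dict.empty
  let vs := agg.values
  [("#cells with >=1 alphas", (vs.countP (fun v => decide ((1:Int) ≤ v.1)) : Int)),
   ("#cells with >=1 betas", (vs.countP (fun v => decide ((1:Int) ≤ v.2)) : Int)),
   ("#cells with >=1 alphas and >=1 betas", (vs.countP (fun v => decide ((1:Int) ≤ v.1) && decide ((1:Int) ≤ v.2)) : Int)),
   ("#cells with >=2 alphas", (vs.countP (fun v => decide ((2:Int) ≤ v.1)) : Int)),
   ("#cells with >=2 betas", (vs.countP (fun v => decide ((2:Int) ≤ v.2)) : Int)),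
   ("#cells with >=2 alphas and >=2 betas", (vs.countP (fun v => decide ((2:Int) ≤ v.1) && decide ((2:Int) ≤ v.2)) : Int))]

-- ===== PRECONDITION & SPEC =====
def Spec_get_tcr_stats_cells (parts : List (String × List (String × List (String × List String)))) (out : List (String × Int)) : Prop := out = get_tcr_stats_cells_alt parts
instance (parts : List (String × List (String × List (String × List String)))) (out : List (String × Int)) : Decidable (Spec_get_tcr_stats_cells parts out) := by unfold Spec_get_tcr_stats_cells; infer_instance

-- ===== CLAIM (what is proved, stated in full; the proofs are below) =====
def Claim_equal_get_tcr_stats_cells : Prop := ∀ (parts : List (String × List (String × List (String × List String)))), Dom_get_tcr_stats_cells parts → Spec_get_tcr_stats_cells parts (get_tcr_stats_cells parts)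

-- ===== LEMMAS AND PROOFS =====

-- The invariant tying A's four sets to B's dict of per-cell maxima.
def pvInv (st : PySem.Set String × PySem.Set String × PySem.Set String × PySem.Set String)
    (agg : PySem.Dict String (Int × Int)) : Prop :=
  st.1.Nodup ∧ st.2.1.Nodup ∧ st.2.2.1.Nodup ∧ st.2.2.2.Nodup ∧ agg.keys.Nodup ∧
  ∀ k, ((1:Int) ≤ (agg.getD k (0,0)).1 ↔ k ∈ st.1) ∧
       ((1:Int) ≤ (agg.getD k (0,0)).2 ↔ k ∈ st.2.1) ∧
       ((2:Int) ≤ (agg.getD k (0,0)).1 ↔ k ∈ st.2.2.1) ∧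
       ((2:Int) ≤ (agg.getD k (0,0)).2 ↔ k ∈ st.2.2.2)

lemma pvGetA (d : PySem.Dict String (List String)) (k : String) :
    (if d.contains k then (d.get? k).getD [] else []) = d.getD k [] := by
  rw [PySem.Dict.getD_eq_get?_getD, PySem.Dict.contains_eq_isSome_get?]
  cases d.get? k <;> simp

lemma pvStepInv (st : PySem.Set String × PySem.Set String × PySem.Set String × PySem.Set String)
    (agg : PySem.Dict String (Int × Int)) (h : pvInv st agg)
    (c : String × List (String × List String)) :
    pvInv (pvCellA st c)
      (pvMerge agg (c.1, (((PySem.Dict.mk c.2).getD "alphas" []).length : Int),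
                        (((PySem.Dict.mk c.2).getD "betas" []).length : Int))) := by
  obtain ⟨A, B, A2, B2⟩ := st
  obtain ⟨h1, h2, h3, h4, hk, hg⟩ := h
  simp only [pvCellA, pvMerge, pvGetA] at *
  refine ⟨?_, ?_, ?_, ?_, PySem.Dict.nodup_keys_insert _ _ _ hk, ?_⟩ <;> dsimp only
  · split_ifs with hb
    · exact PySem.Set.nodup_add _ _ h1
    · exact h1
  · split_ifs with hb
    · exact PySem.Set.nodup_add _ _ h2
    · exact h2
  · split_ifs with hb
    · exact PySem.Set.nodup_add _ _ h3
    · exact h3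
  · split_ifs with hb
    · exact PySem.Set.nodup_add _ _ h4
    · exact h4
  · intro k
    rw [PySem.Dict.getD_insert]
    obtain ⟨g1, g2, g3, g4⟩ := hg k
    by_cases hkn : k = c.1
    · subst hkn
      rw [if_pos rfl]
      by_cases ha1 : 1 ≤ ((PySem.Dict.mk c.2).getD "alphas" []).length <;>
      by_cases hb1 : 1 ≤ ((PySem.Dict.mk c.2).getD "betas" []).length <;>
      by_cases ha2 : 2 ≤ ((PySem.Dict.mk c.2).getD "alphas" []).length <;>
      by_cases hb2 : 2 ≤ ((PySem.Dict.mk c.2).getD "betas" []).length <;>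
        simp_all [PySem.Set.mem_add, Nat.one_le_cast, Nat.ofNat_le_cast] <;>
          (split_ifs <;> simp_all [PySem.Set.mem_add])
    · rw [if_neg hkn]
      refine ⟨?_, ?_, ?_, ?_⟩ <;>
        · split_ifs with hcond <;> simp_all [PySem.Set.mem_add]

lemma pvCellsInv (cells : List (String × List (String × List String)))
    (st : PySem.Set String × PySem.Set String × PySem.Set String × PySem.Set String)
    (agg : PySem.Dict String (Int × Int)) (h : pvInv st agg) :
    pvInv (cells.foldl pvCellA st)
      ((cells.map (fun c =>
          let d := PySem.Dict.mk c.2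
          (c.1, ((d.getD "alphas" []).length : Int), ((d.getD "betas" []).length : Int)))).foldl
        pvMerge agg) := by
  induction cells generalizing st agg with
  | nil => exact h
  | cons c cs ih => exact ih _ _ (pvStepInv _ _ h c)

lemma pvPartsInv (parts : List (String × List (String × List (String × List String))))
    (st : PySem.Set String × PySem.Set String × PySem.Set String × PySem.Set String)
    (agg : PySem.Dict String (Int × Int)) (h : pvInv st agg) :
    pvInv (parts.foldl pvPartA st) ((pvOcc parts).foldl pvMerge agg) := by
  induction parts generalizing st agg with
  | nil => exact h
  | cons p ps ih =>
      simp only [List.foldl_cons, pvPartA, pvOcc, List.flatMap_cons, List.foldl_append]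
      split_ifs with hp
      · exact ih _ _ (pvCellsInv _ _ _ h)
      · exact ih _ _ h

-- Reading one count off the dict's values equals the size of the corresponding set.
lemma pvCount (agg : PySem.Dict String (Int × Int)) (hk : agg.keys.Nodup)
    (S : List String) (hS : S.Nodup) (q : Int × Int → Bool)
    (hq0 : q (0, 0) = false)
    (hq : ∀ k, q (agg.getD k (0, 0)) = decide (k ∈ S)) :
    agg.values.countP q = S.length := by
  have hmem : ∀ a ∈ S, a ∈ agg.keys := by
    intro a ha
    by_contra hnot
    have hc : agg.contains a = false := by
      rw [← Bool.not_eq_true]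
      intro hc
      exact hnot ((PySem.Dict.contains_iff_mem_keys _ _).mp hc)
    have := hq a
    rw [PySem.Dict.getD_of_not_contains (h := hc), hq0] at this
    simp [ha] at this
  rw [PySem.Dict.values_eq_map_keys agg hk (0, 0), List.countP_map]
  have he : (q ∘ fun k => agg.getD k (0, 0)) = fun k => decide (k ∈ S) :=
    funext fun k => hq k
  rw [he, List.countP_eq_length_filter]
  exact List.Perm.length_eq <| (List.perm_ext_iff_of_nodup (hk.filter _) hS).mpr fun a => by
    simp only [List.mem_filter, decide_eq_true_eq]
    exact ⟨fun h => h.2, fun h => ⟨hmem a h, h⟩⟩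

-- ===== VERDICT (by name: the statement is the Claim_ definition above) =====
theorem get_tcr_stats_cells_spec : Claim_equal_get_tcr_stats_cells := by
  intro parts _
  unfold Spec_get_tcr_stats_cells get_tcr_stats_cells get_tcr_stats_cells_alt
  have h0 : pvInv (PySem.Set.empty, PySem.Set.empty, PySem.Set.empty, PySem.Set.empty)
      (PySem.Dict.empty : PySem.Dict String (Int × Int)) := by
    refine ⟨List.nodup_nil, List.nodup_nil, List.nodup_nil, List.nodup_nil, ?_, ?_⟩
    · simp [PySem.Dict.keys, PySem.Dict.empty]
    · intro k; simp [PySem.Dict.getD_empty, PySem.Set.empty]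
  obtain ⟨h1, h2, h3, h4, hk, hg⟩ := pvPartsInv parts _ _ h0
  set st := List.foldl pvPartA (PySem.Set.empty, PySem.Set.empty, PySem.Set.empty, PySem.Set.empty) parts with hst
  set agg := List.foldl pvMerge (PySem.Dict.empty : PySem.Dict String (Int × Int)) (pvOcc parts) with hagg
  simp only [List.cons.injEq, Prod.mk.injEq, and_true]
  refine ⟨⟨trivial, ?_⟩, ⟨trivial, ?_⟩, ⟨trivial, ?_⟩, ⟨trivial, ?_⟩, ⟨trivial, ?_⟩, trivial, ?_⟩
  · rw [pvCount agg hk st.1 h1 _ rfl (fun k => by simp [(hg k).1])]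
    simp [PySem.Set.len]
  · rw [pvCount agg hk st.2.1 h2 _ rfl (fun k => by simp [(hg k).2.1])]
    simp [PySem.Set.len]
  · rw [pvCount agg hk (PySem.Set.inter st.1 st.2.1) (PySem.Set.nodup_inter _ _ h1) _ rfl
      (fun k => by simp [PySem.Set.mem_inter, (hg k).1, (hg k).2.1])]
    simp [PySem.Set.len]
  · rw [pvCount agg hk st.2.2.1 h3 _ rfl (fun k => by simp [(hg k).2.2.1])]
    simp [PySem.Set.len]
  · rw [pvCount agg hk st.2.2.2 h4 _ rfl (fun k => by simp [(hg k).2.2.2])]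
    simp [PySem.Set.len]
  · rw [pvCount agg hk (PySem.Set.inter st.2.2.1 st.2.2.2) (PySem.Set.nodup_inter _ _ h3) _ rfl
      (fun k => by simp [PySem.Set.mem_inter, (hg k).2.2.1, (hg k).2.2.2])]
    simp [PySem.Set.len]
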